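-- pv_equiv track=rewrite | github.com/zackaryhuang/LeetCodeRepo | Peter_Huang/869. 重新排序得到 2 的幂.py | reorderedPowerOf2
-- ===== SOURCE A (Python) =====
-- from collections import Counter
--
-- def reorderedPowerOf2(n):
--     """
--     :type n: int
--     :rtype: bool
--     """
--     max = 10 ** 9
--     candidates = [1]
--     cur_pow = 2
--     while cur_pow <= max:
--         candidates.append(cur_pow)
--         cur_pow *= 2
--     for candidate in candidates:
--         if Counter(str(candidate)).__eq__(Counter(str(n))):
--             return True
--     return False
-- ===== SOURCE B (Python) =====
-- def _is_pow2(m):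
--     if m <= 0:
--         return False
--     while m % 2 == 0:
--         m //= 2
--     return m == 1
--
--
-- def _search(v, rest, first):
--     # v = value of the digits already placed (most significant first);
--     # rest = remaining digits, kept sorted; first = no digit placed yet
--     if not rest:
--         return _is_pow2(v)
--     r = len(rest)
--     lo = v * 10 ** r
--     hi = (v + 1) * 10 ** r - 1
--     # every completion lies in [lo, hi]; prune if no power of 2 lies there
--     if v > 0 and 2 ** ((lo - 1).bit_length()) > hi:
--         return False
--     for i in range(r):
--         if i > 0 and rest[i] == rest[i - 1]:
--             continue  # same digit already tried at this position
--         d = rest[i]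
--         if first and d == '0':
--             continue  # no leading zero
--         if _search(v * 10 + (ord(d) - 48), rest[:i] + rest[i + 1:], False):
--             return True
--     return False
--
--
-- def reorderedPowerOf2(n):
--     """
--     :type n: int
--     :rtype: bool
--     """
--     s = str(n)
--     if not s.isdigit():
--         return False
--     return _search(0, sorted(s), True)
-- ===== Notes on version B (the rewrite author's own statement) =====
-- stated objective: alternative
-- what changed: B reverses the traversal: instead of enumerating the powers of 2 up to 10^9 and comparing digit Counters with n, it enumerates the digit permutations of str(n) (skipping leading zeros), rebuilds each value by Horner's rule and tests power-of-2-ness by halving to the odd part.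
-- intended difference: For n >= 0 whose digit multiset equals that of a 10-digit power of 2 (2^30..2^33, e.g. n=1073741824), A returns False because it only enumerates powers up to 10^9, while B returns True; B is intended since those digits really do rearrange to a power of 2. — e.g. on reorderedPowerOf2(1073741824): A returns false, B returns true
import Mathlib
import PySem

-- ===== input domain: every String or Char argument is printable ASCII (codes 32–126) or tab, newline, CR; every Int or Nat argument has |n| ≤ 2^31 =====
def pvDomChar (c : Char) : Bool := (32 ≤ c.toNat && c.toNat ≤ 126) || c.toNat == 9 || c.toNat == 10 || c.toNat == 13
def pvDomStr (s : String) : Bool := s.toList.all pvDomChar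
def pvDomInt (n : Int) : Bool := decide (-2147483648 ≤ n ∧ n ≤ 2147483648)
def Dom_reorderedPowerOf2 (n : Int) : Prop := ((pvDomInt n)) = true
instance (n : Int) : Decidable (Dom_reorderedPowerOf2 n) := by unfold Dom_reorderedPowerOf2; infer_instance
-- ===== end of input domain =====

set_option maxRecDepth 10000


-- B reverses the traversal: instead of enumerating the powers of 2 up to 10^9 and
-- comparing digit Counters, it searches the digit permutations of str(n) depth-first
-- (no leading zero, duplicate digits tried once per position, branches pruned when no
-- power of 2 lies in the value interval of the prefix) and tests the assembled value
-- by halving it to its odd part (objective: alternative).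

-- ===== PORT A =====
-- the while loop 'while cur_pow <= max: candidates.append(cur_pow); cur_pow *= 2',
-- as structural recursion on a fuel large enough for the loop's 29 iterations
def pvBuildCands (cur : Int) (fuel : Nat) : List Int :=
  match fuel with
  | 0 => []
  | fuel + 1 => if cur ≤ 10 ^ 9 then cur :: pvBuildCands (cur * 2) fuel else []

-- Python dict __eq__ (Counter inherits it; no zero counts occur here):
-- same key set, and every key of d1 maps to the same value in both
def pvDictEq (d1 d2 : PySem.Dict Char Int) : Bool :=
  PySem.Set.equal (PySem.Dict.keys d1) (PySem.Dict.keys d2) &&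
    (PySem.Dict.keys d1).all (fun k => PySem.Dict.getD d1 k 0 == PySem.Dict.getD d2 k 0)

def reorderedPowerOf2 (n : Int) : Bool :=
  (1 :: pvBuildCands 2 34).any (fun candidate =>
    pvDictEq (PySem.Dict.counter (PySem.Int.toStr candidate).toList)
             (PySem.Dict.counter (PySem.Int.toStr n).toList))

-- ===== PORT B =====
-- 'while m % 2 == 0: m //= 2' for m > 0, as fuel recursion; the loop runs at most
-- bit_length(m) times and every m reached here satisfies |m| < 2^128
def pvHalve (m : Int) (fuel : Nat) : Int :=
  match fuel with
  | 0 => m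
  | fuel + 1 => if PySem.Int.mod m 2 = 0 then pvHalve (PySem.Int.floordiv m 2) fuel else m

def pvIsPow2 (m : Int) : Bool :=
  if m ≤ 0 then false else pvHalve m 128 == 1

-- _search(v, rest, first): depth-first over the remaining digits, recursion on the
-- length of rest (rest.eraseIdx i = rest[:i] + rest[i+1:] is one element shorter)
def pvSearch (v : Int) (rest : List Char) (first : Bool) : Bool :=
  if rest.isEmpty then pvIsPow2 v
  else if decide (0 < v) &&
      decide ((v + 1) * 10 ^ rest.length - 1 <
        2 ^ PySem.Int.bitLength (v * 10 ^ rest.length - 1)) then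
    false
  else
    (List.range rest.length).attach.any (fun ⟨i, hmem⟩ =>
      if decide (0 < i) && (rest.getD i ' ' == rest.getD (i - 1) ' ') then false
      else if first && (rest.getD i ' ' == '0') then false
      else pvSearch (v * 10 + (((rest.getD i ' ').toNat : Int) - 48)) (rest.eraseIdx i) false)
termination_by rest.length
decreasing_by
  have h := List.mem_range.mp hmem
  simp [List.length_eraseIdx, h]
  omega

def reorderedPowerOf2_alt (n : Int) : Bool :=
  let s := PySem.Int.toStr n
  if !(PySem.Str.strIsdigit s) then false
  else pvSearch 0 (PySem.List.sorted s.toList (fun x => x) false) true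

-- ===== PRECONDITION & SPEC =====
-- For n ≥ 0 whose digit multiset equals that of a 10-digit power of 2 (2^30..2^33,
-- e.g. n = 1073741824), A returns False because it only enumerates powers up to 10^9,
-- while B returns True; B's value is the intended one since those digits really do
-- rearrange to a power of 2.
def D_reorderedPowerOf2 (n : Int) : Prop :=
  PySem.List.sorted (PySem.Int.toChars n) (fun x => x) false ∈
    ["0112344778".toList, "1234446788".toList, "2244667999".toList, "2345588999".toList]
instance (n : Int) : Decidable (D_reorderedPowerOf2 n) := by unfold D_reorderedPowerOf2; infer_instance

def Spec_reorderedPowerOf2 (n : Int) (out : Bool) : Prop :=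
  ¬ D_reorderedPowerOf2 n → out = reorderedPowerOf2_alt n
instance (n : Int) (out : Bool) : Decidable (Spec_reorderedPowerOf2 n out) := by
  unfold Spec_reorderedPowerOf2; infer_instance

def pvDiffWitness_reorderedPowerOf2 : Int := 1073741824
def pvDiffWitnessOut_reorderedPowerOf2 : Bool × Bool := (false, true)

-- ===== CLAIM (what is proved, stated in full; the proofs are below) =====
def Claim_unchanged_reorderedPowerOf2 : Prop :=
  ∀ (n : Int), Dom_reorderedPowerOf2 n → Spec_reorderedPowerOf2 n (reorderedPowerOf2 n)
def Claim_changed_reorderedPowerOf2 : Prop :=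
  Dom_reorderedPowerOf2 (pvDiffWitness_reorderedPowerOf2) ∧
  D_reorderedPowerOf2 (pvDiffWitness_reorderedPowerOf2) ∧
  reorderedPowerOf2 (pvDiffWitness_reorderedPowerOf2) = pvDiffWitnessOut_reorderedPowerOf2.1 ∧
  reorderedPowerOf2_alt (pvDiffWitness_reorderedPowerOf2) = pvDiffWitnessOut_reorderedPowerOf2.2 ∧
  pvDiffWitnessOut_reorderedPowerOf2.1 ≠ pvDiffWitnessOut_reorderedPowerOf2.2
def Claim_exact_reorderedPowerOf2 : Prop :=
  ∀ (n : Int), Dom_reorderedPowerOf2 n → D_reorderedPowerOf2 n →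
    reorderedPowerOf2 n ≠ reorderedPowerOf2_alt n

-- ===== LEMMAS AND PROOFS =====

-- A's candidate list, evaluated
def pvCands : List Int :=
  [1, 2, 4, 8, 16, 32, 64, 128, 256, 512, 1024, 2048, 4096, 8192, 16384, 32768, 65536,
   131072, 262144, 524288, 1048576, 2097152, 4194304, 8388608, 16777216, 33554432,
   67108864, 134217728, 268435456, 536870912]

theorem pvCands_eq : (1 : Int) :: pvBuildCands 2 34 = pvCands := by decide

-- Counter (dict) equality of two char lists is equality of their counts everywhere
theorem pvDictEq_counter_iff (u v : List Char) :
    pvDictEq (PySem.Dict.counter u) (PySem.Dict.counter v) = true ↔ ∀ c, u.count c = v.count c := by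
  unfold pvDictEq
  simp only [Bool.and_eq_true, PySem.Set.equal_iff, List.all_eq_true,
    PySem.Dict.keys_counter, PySem.Set.mem_ofList, PySem.Dict.getD_counter, beq_iff_eq,
    Nat.cast_inj]
  constructor
  · rintro ⟨hk, hc⟩ c
    by_cases hu : c ∈ u
    · exact hc c hu
    · have hv : c ∉ v := fun hv => hu ((hk c).mpr hv)
      simp [List.count_eq_zero_of_not_mem, hu, hv]
  · intro h
    refine ⟨fun x => ?_, fun k _ => h k⟩
    constructor <;> intro hx
    · have := List.count_pos_iff.mpr hx
      rw [h] at this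
      exact List.count_pos_iff.mp this
    · have := List.count_pos_iff.mpr hx
      rw [← h] at this
      exact List.count_pos_iff.mp this

theorem pvDictEq_counter_perm (u v : List Char) :
    pvDictEq (PySem.Dict.counter u) (PySem.Dict.counter v) = true ↔ u.Perm v := by
  rw [pvDictEq_counter_iff, List.perm_iff_count]

-- A returns True exactly when some candidate's digits are a permutation of n's digits
theorem pvA_char (n : Int) :
    reorderedPowerOf2 n = true ↔
      ∃ c ∈ pvCands, (PySem.Int.toChars c).Perm (PySem.Int.toChars n) := by
  unfold reorderedPowerOf2
  rw [pvCands_eq, List.any_eq_true]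
  simp only [pvDictEq_counter_perm, PySem.Int.toList_toStr]

-- character-level facts
theorem pvIsdigit_iff (c : Char) : PySem.Chars.isdigit c = true ↔ 48 ≤ c.toNat ∧ c.toNat ≤ 57 := by
  rw [PySem.Chars.isdigit]
  simp only [Bool.and_eq_true, decide_eq_true_eq]
  constructor
  · rintro ⟨h1, h2⟩
    exact ⟨Nat.succ_le_of_lt h1, h2⟩
  · rintro ⟨h1, h2⟩
    exact ⟨Nat.lt_of_succ_le h1, h2⟩

theorem pvChar_eq_of_toNat {c d : Char} (h : c.toNat = d.toNat) : c = d := by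
  have := congrArg Char.ofNat h
  simpa [Char.ofNat_toNat] using this

-- alt when the digit guard fails
theorem pvAlt_guard_false (n : Int) (hg : PySem.Str.strIsdigit (PySem.Int.toStr n) = false) :
    reorderedPowerOf2_alt n = false := by
  have hg' : PySem.Chars.strIsdigit (PySem.Int.toChars n) = false := by
    rw [← PySem.Int.toList_toStr]
    exact hg
  unfold reorderedPowerOf2_alt
  simp [PySem.Str.strIsdigit, PySem.Int.toList_toStr, hg']

-- the digit guard, on the list side
theorem pvGuard_iff (n : Int) :
    PySem.Str.strIsdigit (PySem.Int.toStr n) = true ↔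
      PySem.Int.toChars n ≠ [] ∧ ∀ c ∈ PySem.Int.toChars n, PySem.Chars.isdigit c = true := by
  rw [PySem.Str.strIsdigit, PySem.Chars.strIsdigit]
  simp [PySem.Int.toList_toStr]

-- ----- digit strings and their values -----

-- the Nat shadow of pvValFrom 0
def pvValN (t : List Char) : Nat :=
  t.foldl (fun a c => a * 10 + (c.toNat - 48)) 0

theorem pvValN_aux : ∀ (t : List Char) (a : Nat),
    t.foldl (fun a c => a * 10 + (c.toNat - 48)) a =
      a * 10 ^ t.length + Nat.ofDigits 10 (t.reverse.map (fun c => c.toNat - 48)) := by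
  intro t
  induction t with
  | nil => intro a; simp
  | cons c t ih =>
    intro a
    rw [List.foldl_cons, ih]
    simp only [List.reverse_cons, List.map_append, List.map_cons, List.map_nil,
      Nat.ofDigits_append, Nat.ofDigits_singleton, List.length_cons, List.length_map,
      List.length_reverse]
    ring

theorem pvValN_eq_ofDigits (t : List Char) :
    pvValN t = Nat.ofDigits 10 (t.reverse.map (fun c => c.toNat - 48)) := by
  rw [pvValN, pvValN_aux]; ring

-- Horner evaluation of a digit suffix on top of a prefix value v
def pvValFrom (v : Int) (t : List Char) : Int :=
  t.foldl (fun a c => a * 10 + ((c.toNat : Int) - 48)) v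

theorem pvValN_cons (c : Char) (t : List Char) :
    pvValN (c :: t) = (c.toNat - 48) * 10 ^ t.length + pvValN t := by
  rw [pvValN, pvValN, List.foldl_cons]
  simp only [Nat.zero_mul, Nat.zero_add]
  rw [pvValN_aux t (c.toNat - 48), pvValN_aux t 0]
  ring

theorem pvValFrom_split (t : List Char) (hd : ∀ c ∈ t, PySem.Chars.isdigit c = true) :
    ∀ v : Int, pvValFrom v t = v * 10 ^ t.length + (pvValN t : Int) := by
  induction t with
  | nil => intro v; simp [pvValFrom, pvValN]
  | cons c t ih =>
    intro v
    have h48 := ((pvIsdigit_iff c).mp (hd c (List.mem_cons_self ..))).1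
    have hstep : pvValFrom v (c :: t) = pvValFrom (v * 10 + ((c.toNat : Int) - 48)) t := rfl
    rw [hstep, ih (fun x hx => hd x (List.mem_cons_of_mem _ hx)), pvValN_cons,
      List.length_cons, pow_succ]
    push_cast [Nat.cast_sub h48]
    ring

theorem pvValFrom_zero (t : List Char) (hd : ∀ c ∈ t, PySem.Chars.isdigit c = true) :
    pvValFrom 0 t = (pvValN t : Int) := by
  rw [pvValFrom_split t hd 0]
  ring

theorem pvValN_lt (t : List Char) (hd : ∀ c ∈ t, PySem.Chars.isdigit c = true) :
    pvValN t < 10 ^ t.length := by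
  rw [pvValN_eq_ofDigits]
  have := Nat.ofDigits_lt_base_pow_length (b := 10) (l := t.reverse.map (fun c => c.toNat - 48))
    (by norm_num) ?_
  · simpa using this
  · intro x hx
    obtain ⟨c, hc, rfl⟩ := List.mem_map.mp hx
    have := ((pvIsdigit_iff c).mp (hd c (List.mem_reverse.mp hc))).2
    omega

-- a nonempty no-leading-zero digit string is the base-10 digit expansion of its value
theorem pvDigits_of_valN (t : List Char) (hd : ∀ c ∈ t, PySem.Chars.isdigit c = true)
    (hne : t ≠ []) (hh : t.headI ≠ '0') :
    Nat.digits 10 (pvValN t) = t.reverse.map (fun c => c.toNat - 48) := by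
  rw [pvValN_eq_ofDigits]
  apply Nat.digits_ofDigits 10 (by norm_num)
  · intro x hx
    obtain ⟨c, hc, rfl⟩ := List.mem_map.mp hx
    have := ((pvIsdigit_iff c).mp (hd c (List.mem_reverse.mp hc))).2
    omega
  · intro h
    obtain ⟨c, t', rfl⟩ := List.exists_cons_of_ne_nil hne
    have hcd := (pvIsdigit_iff c).mp (hd c (List.mem_cons_self ..))
    have hc0 : c.toNat ≠ 48 := by
      intro hc
      exact hh (by simpa using pvChar_eq_of_toNat (d := '0') hc)
    simp only [List.reverse_cons, List.map_append, List.map_cons, List.map_nil,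
      List.getLast_append]
    simp only [List.isEmpty_cons, Bool.false_eq_true, reduceDIte, List.getLast_singleton]
    omega

theorem pvMap_dval_inj : ∀ (t u : List Char),
    (∀ c ∈ t, PySem.Chars.isdigit c = true) → (∀ c ∈ u, PySem.Chars.isdigit c = true) →
    t.map (fun c => c.toNat - 48) = u.map (fun c => c.toNat - 48) → t = u := by
  intro t
  induction t with
  | nil =>
    intro u _ _ h
    have := congrArg List.length h
    simpa using (List.map_eq_nil_iff.mp h.symm).symm
  | cons c t ih =>
    intro u hdt hdu h
    cases u with
    | nil => simp at h
    | cons c' u =>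
      simp only [List.map_cons, List.cons.injEq] at h
      have h1 := ((pvIsdigit_iff c).mp (hdt c (List.mem_cons_self ..))).1
      have h2 := ((pvIsdigit_iff c').mp (hdu c' (List.mem_cons_self ..))).1
      have hc : c = c' := pvChar_eq_of_toNat (by omega)
      subst hc
      exact congrArg (c :: ·)
        (ih u (fun x hx => hdt x (List.mem_cons_of_mem _ hx))
              (fun x hx => hdu x (List.mem_cons_of_mem _ hx)) h.2)

-- a value has at most one nonempty no-leading-zero digit representation
theorem pvValN_inj (t u : List Char)
    (hdt : ∀ c ∈ t, PySem.Chars.isdigit c = true) (hdu : ∀ c ∈ u, PySem.Chars.isdigit c = true)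
    (hnet : t ≠ []) (hneu : u ≠ []) (hht : t.headI ≠ '0') (hhu : u.headI ≠ '0')
    (h : pvValN t = pvValN u) : t = u := by
  have h1 := pvDigits_of_valN t hdt hnet hht
  have h2 := pvDigits_of_valN u hdu hneu hhu
  rw [h] at h1
  have h3 : t.reverse.map (fun c => c.toNat - 48) = u.reverse.map (fun c => c.toNat - 48) :=
    h1.symm.trans h2
  have h4 : t.reverse = u.reverse :=
    pvMap_dval_inj _ _ (fun c hc => hdt c (List.mem_reverse.mp hc))
      (fun c hc => hdu c (List.mem_reverse.mp hc)) h3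
  simpa using congrArg List.reverse h4

-- ----- the halving loop recognises exactly the powers of two -----
theorem pvHalve_pow2 : ∀ (fuel : Nat) (m : Int), 0 < m → m < 2 ^ fuel →
    (pvHalve m fuel = 1 ↔ ∃ k : Nat, m = 2 ^ k) := by
  intro fuel
  induction fuel with
  | zero =>
    intro m h1 h2
    simp at h2
    omega
  | succ fuel ih =>
    intro m h1 h2
    have hmod : PySem.Int.mod m 2 = m % 2 := PySem.Int.mod_eq_emod_of_pos (by norm_num)
    have hdiv : PySem.Int.floordiv m 2 = m / 2 := PySem.Int.floordiv_eq_ediv_of_pos (by norm_num)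
    have hsplit : m = 2 * (m / 2) + m % 2 := (Int.mul_ediv_add_emod m 2).symm.trans (by ring)
    rw [pvHalve, hmod, hdiv]
    by_cases he : m % 2 = 0
    · rw [if_pos he]
      have hpos : 0 < m / 2 := by omega
      have hlt : m / 2 < 2 ^ fuel := by
        rw [pow_succ] at h2
        omega
      rw [ih (m / 2) hpos hlt]
      constructor
      · rintro ⟨k, hk⟩
        exact ⟨k + 1, by rw [pow_succ]; omega⟩
      · rintro ⟨k, hk⟩
        cases k with
        | zero => omega
        | succ k =>
          refine ⟨k, ?_⟩
          rw [pow_succ] at hk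
          omega
    · rw [if_neg he]
      constructor
      · intro hm
        exact ⟨0, by simpa using hm⟩
      · rintro ⟨k, hk⟩
        cases k with
        | zero => simpa using hk
        | succ k =>
          exfalso
          rw [pow_succ] at hk
          omega

theorem pvIsPow2_iff (m : Int) (hm : m < 2 ^ 128) :
    pvIsPow2 m = true ↔ 0 < m ∧ ∃ k : Nat, m = 2 ^ k := by
  unfold pvIsPow2
  by_cases h0 : m ≤ 0
  · simp [h0]
  · rw [if_neg h0, beq_iff_eq, pvHalve_pow2 128 m (by omega) hm]
    constructor
    · exact fun h => ⟨by omega, h⟩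
    · exact fun h => h.2


-- smallest power of two at least lo = 2 ^ bit_length(lo - 1)  (soundness of the prune)
theorem pvPow2_ge (a : Int) (ha : 1 ≤ a) (k : Nat) (h : a + 1 ≤ 2 ^ k) :
    (2 : Int) ^ PySem.Int.bitLength a ≤ 2 ^ k := by
  have hble : PySem.Int.bitLength a ≤ k := by
    by_contra hgt
    have h1 : 2 ^ (PySem.Int.bitLength a - 1) ≤ a.natAbs :=
      PySem.Int.two_pow_bitLength_le a (by omega)
    have h2 : (2 : Nat) ^ k ≤ 2 ^ (PySem.Int.bitLength a - 1) :=
      Nat.pow_le_pow_right (by norm_num) (by omega)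
    have h3 : a.natAbs = a.toNat := by omega
    have h4 : ((2 : Nat) ^ k : Int) ≤ a := by
      have := le_trans h2 h1
      rw [h3] at this
      omega
    have h5 : ((2 : Nat) ^ k : Int) = (2 : Int) ^ k := by push_cast; ring
    omega
  calc (2 : Int) ^ PySem.Int.bitLength a ≤ 2 ^ k := by
        apply pow_le_pow_right₀ (by norm_num) hble

-- empty remainder: the search is exactly the power test on the assembled value
theorem pvSearch_nil (v : Int) (first : Bool) :
    pvSearch v [] first = true ↔
      ∃ t : List Char, t.Perm [] ∧
        (first = true → ¬ (PySem.List.pyGet? t 0 = some '0')) ∧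
        pvIsPow2 (pvValFrom v t) = true := by
  rw [pvSearch]
  simp only [List.isEmpty_nil, if_true]
  constructor
  · intro h
    exact ⟨[], List.Perm.refl [], by intro _; simp [pysem], h⟩
  · rintro ⟨t, hperm, _, hpow⟩
    have ht : t = [] := hperm.eq_nil
    subst ht
    exact hpow

-- the invariant of the search: it succeeds exactly when some arrangement of the
-- remaining digits (no leading zero on the very first position) completes the
-- prefix value v to a power of two
theorem pvSearch_iff : ∀ (N : Nat) (rest : List Char), rest.length ≤ N →
    ∀ (v : Int) (first : Bool),
    (∀ c ∈ rest, PySem.Chars.isdigit c = true) →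
    (first = true → v = 0) → (first = false → 1 ≤ v) →
    (v + 1) * 10 ^ rest.length ≤ 10 ^ 10 →
    (pvSearch v rest first = true ↔
      ∃ t : List Char, t.Perm rest ∧
        (first = true → ¬ (PySem.List.pyGet? t 0 = some '0')) ∧
        pvIsPow2 (pvValFrom v t) = true) := by
  intro N
  induction N with
  | zero =>
    intro rest hlen v first _ _ _ _
    have : rest = [] := List.eq_nil_of_length_eq_zero (by omega)
    subst this
    exact pvSearch_nil v first
  | succ N ih =>
    intro rest hlen v first hdig hf0 hf1 hbound
    cases hrest : rest with
    | nil => exact pvSearch_nil v first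
    | cons c0 rest0 =>
    subst hrest
    have hr1 : 1 ≤ (c0 :: rest0).length := by simp
    have hv0 : 0 ≤ v := by
      cases first
      · have := hf1 rfl; omega
      · have := hf0 rfl; omega
    have hpow10 : (10 : Int) ≤ 10 ^ (c0 :: rest0).length := by
      calc (10 : Int) = 10 ^ 1 := by ring
        _ ≤ 10 ^ (c0 :: rest0).length := by
            apply pow_le_pow_right₀ (by norm_num) hr1
    -- the value of any completion lies between lo and hi
    have hval_bounds : ∀ t : List Char, t.Perm (c0 :: rest0) →
        v * 10 ^ (c0 :: rest0).length ≤ pvValFrom v t ∧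
        pvValFrom v t ≤ (v + 1) * 10 ^ (c0 :: rest0).length - 1 := by
      intro t hperm
      have hdt : ∀ c ∈ t, PySem.Chars.isdigit c = true :=
        fun c hc => hdig c (hperm.mem_iff.mp hc)
      have hlt := pvValN_lt t hdt
      have hlen_t : t.length = (c0 :: rest0).length := hperm.length_eq
      rw [pvValFrom_split t hdt v, hlen_t]
      have h1 : (0 : Int) ≤ (pvValN t : Int) := by positivity
      have h2 : (pvValN t : Int) < 10 ^ (c0 :: rest0).length := by
        rw [← hlen_t]
        exact_mod_cast hlt
      constructor <;> nlinarith [pow_pos (show (0:Int) < 10 by norm_num) (c0 :: rest0).length]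
    rw [pvSearch]
    simp only [List.isEmpty_cons, Bool.false_eq_true, if_false]
    by_cases hprune : (decide (0 < v) &&
        decide ((v + 1) * 10 ^ (c0 :: rest0).length - 1 <
          2 ^ PySem.Int.bitLength (v * 10 ^ (c0 :: rest0).length - 1))) = true
    · -- the prune fires: no completion can be a power of two
      rw [if_pos hprune]
      simp only [Bool.and_eq_true, decide_eq_true_eq] at hprune
      obtain ⟨hvpos, hcut⟩ := hprune
      constructor
      · intro h; exact absurd h (by simp)
      · rintro ⟨t, hperm, _, hpow⟩
        exfalso
        obtain ⟨hlo, hhi⟩ := hval_bounds t hperm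
        have hm128 : pvValFrom v t < 2 ^ 128 := by
          have : (10 : Int) ^ 10 < 2 ^ 128 := by norm_num
          omega
        obtain ⟨hmpos, k, hk⟩ := (pvIsPow2_iff _ hm128).mp hpow
        have hlo1 : 1 ≤ v * 10 ^ (c0 :: rest0).length - 1 := by nlinarith
        have hge : (2 : Int) ^ PySem.Int.bitLength (v * 10 ^ (c0 :: rest0).length - 1) ≤ 2 ^ k := by
          apply pvPow2_ge _ hlo1 k
          omega
        omega
    · -- no prune: one level of the search
      rw [if_neg hprune]
      rw [List.any_eq_true]
      constructor
      · -- a successful branch yields a witness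
        rintro ⟨⟨i, hmem⟩, _, hbody⟩
        have hi : i < (c0 :: rest0).length := List.mem_range.mp hmem
        by_cases hs1 : (decide (0 < i) &&
            ((c0 :: rest0).getD i ' ' == (c0 :: rest0).getD (i - 1) ' ')) = true
        · rw [if_pos hs1] at hbody; exact absurd hbody (by simp)
        by_cases hs2 : (first && ((c0 :: rest0).getD i ' ' == '0')) = true
        · rw [if_neg hs1, if_pos hs2] at hbody; exact absurd hbody (by simp)
        rw [if_neg hs1, if_neg hs2] at hbody
        have hgetD : (c0 :: rest0).getD i ' ' = (c0 :: rest0)[i] := List.getD_eq_getElem _ _ hi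
        rw [hgetD] at hbody
        have hddig : PySem.Chars.isdigit ((c0 :: rest0)[i]) = true :=
          hdig _ (List.getElem_mem hi)
        have h48 := (pvIsdigit_iff _).mp hddig
        have hz : first = true → (c0 :: rest0)[i] ≠ '0' := by
          intro hfirst hzero
          apply hs2
          rw [hfirst, hgetD, hzero]
          simp
        -- the new prefix value
        have hv1' : first = false → (1 : Int) ≤ v * 10 + (((c0 :: rest0)[i].toNat : Int) - 48) := by
          intro hfirst
          have := hf1 hfirst
          omega
        have hv0' : first = true → (1 : Int) ≤ v * 10 + (((c0 :: rest0)[i].toNat : Int) - 48) := by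
          intro hfirst
          have hv := hf0 hfirst
          have hne0 : (c0 :: rest0)[i].toNat ≠ 48 := by
            intro h
            exact hz hfirst (pvChar_eq_of_toNat (d := '0') (by simpa using h))
          omega
        have hv'pos : (1 : Int) ≤ v * 10 + (((c0 :: rest0)[i].toNat : Int) - 48) := by
          cases first
          · exact hv1' rfl
          · exact hv0' rfl
        have hlen' : ((c0 :: rest0).eraseIdx i).length ≤ N := by
          rw [List.length_eraseIdx_of_lt hi]
          simp only [List.length_cons] at hlen ⊢
          omega
        have hdig' : ∀ c ∈ (c0 :: rest0).eraseIdx i, PySem.Chars.isdigit c = true :=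
          fun c hc => hdig c (List.mem_of_mem_eraseIdx hc)
        have hbound' : (v * 10 + (((c0 :: rest0)[i].toNat : Int) - 48) + 1) *
            10 ^ ((c0 :: rest0).eraseIdx i).length ≤ 10 ^ 10 := by
          have he : ((c0 :: rest0).eraseIdx i).length = (c0 :: rest0).length - 1 :=
            List.length_eraseIdx_of_lt hi
          have hsucc : (c0 :: rest0).length = ((c0 :: rest0).length - 1) + 1 := by
            simp
          calc (v * 10 + (((c0 :: rest0)[i].toNat : Int) - 48) + 1) *
                10 ^ ((c0 :: rest0).eraseIdx i).length
              ≤ ((v + 1) * 10) * 10 ^ ((c0 :: rest0).eraseIdx i).length := by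
                apply mul_le_mul_of_nonneg_right _ (by positivity)
                omega
            _ = (v + 1) * 10 ^ (((c0 :: rest0).length - 1) + 1) := by
                rw [he, pow_succ]
                ring
            _ = (v + 1) * 10 ^ (c0 :: rest0).length := by rw [← hsucc]
            _ ≤ 10 ^ 10 := hbound
        obtain ⟨t', ht'perm, _, ht'pow⟩ :=
          (ih ((c0 :: rest0).eraseIdx i) hlen' _ false hdig' (by simp) (fun _ => hv'pos)
            hbound').mp hbody
        refine ⟨(c0 :: rest0)[i] :: t', ?_, ?_, ?_⟩
        · exact (ht'perm.cons ((c0 :: rest0)[i])).trans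
            (List.getElem_cons_eraseIdx_perm hi)
        · intro hfirst
          have := hz hfirst
          simp [pysem]
          exact this
        · exact ht'pow
      · -- a witness yields a successful branch
        rintro ⟨t, hperm, hh, hpow⟩
        have htne : t ≠ [] := by
          intro h
          subst h
          exact absurd hperm.symm.eq_nil (by simp)
        obtain ⟨c, t', rfl⟩ := List.exists_cons_of_ne_nil htne
        have hc : c ∈ (c0 :: rest0) := hperm.mem_iff.mp (List.mem_cons_self ..)
        have hidx : (PySem.List.index? (c0 :: rest0) c).isSome :=
          (PySem.List.index?_isSome_iff _ _).mpr hc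
        obtain ⟨k, hk⟩ := Option.isSome_iff_exists.mp hidx
        obtain ⟨hklt, hkc, hkmin⟩ := PySem.List.getElem_of_index?_eq_some hk
        refine ⟨⟨k, List.mem_range.mpr hklt⟩, List.mem_attach _ _, ?_⟩
        dsimp only
        have hgetD : (c0 :: rest0).getD k ' ' = (c0 :: rest0)[k] := List.getD_eq_getElem _ _ hklt
        have hs1 : (decide (0 < k) &&
            ((c0 :: rest0).getD k ' ' == (c0 :: rest0).getD (k - 1) ' ')) = false := by
          cases hk0 : decide (0 < k) with
          | false => simp
          | true =>
            have hk0' : 0 < k := of_decide_eq_true hk0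
            have hgetD' : (c0 :: rest0).getD (k - 1) ' ' = (c0 :: rest0)[k - 1] :=
              List.getD_eq_getElem _ _ (by omega)
            have hne := hkmin (k - 1) (by omega)
            simp only [hgetD, hgetD', hkc, Bool.and_eq_false_iff, beq_eq_false_iff_ne,
              ne_eq]
            right
            intro he
            exact hne he.symm
        rw [if_neg (by rw [hs1]; simp)]
        have hs2 : (first && ((c0 :: rest0).getD k ' ' == '0')) = false := by
          cases hf : first with
          | false => simp
          | true =>
            simp only [Bool.true_and, hgetD, hkc]
            apply beq_eq_false_iff_ne.mpr
            intro he
            apply hh hf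
            subst he
            simp [pysem]
        rw [if_neg (by rw [hs2]; simp)]
        -- recurse with the rest of the witness
        have ht' : t'.Perm ((c0 :: rest0).eraseIdx k) := by
          have h2 : (c :: t').Perm (c :: (c0 :: rest0).eraseIdx k) := by
            rw [← hkc] at hperm ⊢
            exact hperm.trans (List.getElem_cons_eraseIdx_perm hklt).symm
          exact h2.cons_inv
        have hcd : PySem.Chars.isdigit c = true := hdig c hc
        have h48 := (pvIsdigit_iff c).mp hcd
        have hv'pos : (1 : Int) ≤ v * 10 + ((c.toNat : Int) - 48) := by
          cases hf : first with
          | false =>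
            have := hf1 hf
            omega
          | true =>
            have hv := hf0 hf
            have hne0 : c.toNat ≠ 48 := by
              intro h
              have hc0 : c = '0' := pvChar_eq_of_toNat (d := '0') (by simpa using h)
              apply hh hf
              subst hc0
              simp [pysem]
            omega
        have hlen' : ((c0 :: rest0).eraseIdx k).length ≤ N := by
          rw [List.length_eraseIdx_of_lt hklt]
          simp only [List.length_cons] at hlen ⊢
          omega
        have hdig' : ∀ x ∈ (c0 :: rest0).eraseIdx k, PySem.Chars.isdigit x = true :=
          fun x hx => hdig x (List.mem_of_mem_eraseIdx hx)
        have hbound' : (v * 10 + ((c.toNat : Int) - 48) + 1) *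
            10 ^ ((c0 :: rest0).eraseIdx k).length ≤ 10 ^ 10 := by
          have he : ((c0 :: rest0).eraseIdx k).length = (c0 :: rest0).length - 1 :=
            List.length_eraseIdx_of_lt hklt
          have hsucc : (c0 :: rest0).length = ((c0 :: rest0).length - 1) + 1 := by simp
          calc (v * 10 + ((c.toNat : Int) - 48) + 1) * 10 ^ ((c0 :: rest0).eraseIdx k).length
              ≤ ((v + 1) * 10) * 10 ^ ((c0 :: rest0).eraseIdx k).length := by
                apply mul_le_mul_of_nonneg_right _ (by positivity)
                omega
            _ = (v + 1) * 10 ^ (((c0 :: rest0).length - 1) + 1) := by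
                rw [he, pow_succ]
                ring
            _ = (v + 1) * 10 ^ (c0 :: rest0).length := by rw [← hsucc]
            _ ≤ 10 ^ 10 := hbound
        rw [hgetD, hkc]
        apply (ih ((c0 :: rest0).eraseIdx k) hlen' _ false hdig' (by simp) (fun _ => hv'pos)
          hbound').mpr
        exact ⟨t', ht', by simp, hpow⟩

-- B, when the digit guard holds and n has at most 10 digits, returns True exactly
-- when some no-leading-zero rearrangement of n's digits is a power of two
theorem pvB_char (n : Int) (hg : PySem.Str.strIsdigit (PySem.Int.toStr n) = true)
    (hlen : (PySem.Int.toChars n).length ≤ 10) :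
    reorderedPowerOf2_alt n = true ↔
      ∃ t : List Char, t.Perm (PySem.Int.toChars n) ∧
        ¬ (PySem.List.pyGet? t 0 = some '0') ∧ pvIsPow2 (pvValFrom 0 t) = true := by
  have hsp : (PySem.List.sorted (PySem.Int.toChars n) (fun x => x) false).Perm
      (PySem.Int.toChars n) := PySem.List.sorted_perm _ _ _
  have halt : reorderedPowerOf2_alt n =
      pvSearch 0 (PySem.List.sorted (PySem.Int.toChars n) (fun x => x) false) true := by
    have hg' : PySem.Chars.strIsdigit (PySem.Int.toChars n) = true := by
      rw [← PySem.Int.toList_toStr]; exact hg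
    unfold reorderedPowerOf2_alt
    simp [PySem.Str.strIsdigit, PySem.Int.toList_toStr, hg']
  rw [halt, pvSearch_iff ((PySem.Int.toChars n).length)
      (PySem.List.sorted (PySem.Int.toChars n) (fun x => x) false)
      (by rw [hsp.length_eq]) 0 true
      (fun c hc => ((pvGuard_iff n).mp hg).2 c (hsp.mem_iff.mp hc))
      (fun _ => rfl) (by simp)
      (by
        rw [hsp.length_eq]
        have h1 : (10 : Int) ^ (PySem.Int.toChars n).length ≤ 10 ^ 10 :=
          pow_le_pow_right₀ (by norm_num) hlen
        omega)]
  constructor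
  · rintro ⟨t, hperm, hh, hpow⟩
    exact ⟨t, hperm.trans hsp, hh rfl, hpow⟩
  · rintro ⟨t, hperm, hh, hpow⟩
    exact ⟨t, hperm.trans hsp.symm, fun _ => hh, hpow⟩

-- ----- concrete facts about the candidates (by evaluation) -----
theorem pvCands_facts : ∀ c ∈ pvCands,
    (PySem.Int.toChars c).all PySem.Chars.isdigit = true ∧
    PySem.Int.toChars c ≠ [] ∧
    ¬ (PySem.List.pyGet? (PySem.Int.toChars c) 0 = some '0') ∧
    pvValFrom 0 (PySem.Int.toChars c) = c ∧
    (PySem.Int.toChars c).length ≤ 9 ∧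
    ∃ k < 30, c = ((2 ^ k : Nat) : Int) := by decide

theorem pvCands_val : ∀ k < 30, ((2 ^ k : Nat) : Int) ∈ pvCands ∧
    pvValN (PySem.Int.toChars ((2 ^ k : Nat) : Int)) = 2 ^ k := by decide

def pvBig : List Int := [1073741824, 2147483648, 4294967296, 8589934592]

theorem pvBig_facts : ∀ q ∈ pvBig,
    (PySem.Int.toChars q).all PySem.Chars.isdigit = true ∧
    PySem.Int.toChars q ≠ [] ∧
    ¬ (PySem.List.pyGet? (PySem.Int.toChars q) 0 = some '0') ∧
    pvValFrom 0 (PySem.Int.toChars q) = q ∧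
    (PySem.Int.toChars q).length = 10 ∧
    ∃ k < 34, q = ((2 ^ k : Nat) : Int) := by decide

theorem pvBig_val : ∀ k, 30 ≤ k → k < 34 → ((2 ^ k : Nat) : Int) ∈ pvBig ∧
    pvValN (PySem.Int.toChars ((2 ^ k : Nat) : Int)) = 2 ^ k := by
  intro k h1 h2
  interval_cases k <;> exact ⟨by decide, by decide⟩

-- the boolean power-of-two test succeeds on every explicit power 2^k, k < 34
theorem pvIsPow2_of (q : Int) (k : Nat) (hk : q = ((2 ^ k : Nat) : Int)) (hk34 : k < 34)
    (hval : pvValFrom 0 (PySem.Int.toChars q) = q) :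
    pvIsPow2 (pvValFrom 0 (PySem.Int.toChars q)) = true := by
  rw [hval]
  have hbound : q < 2 ^ 128 := by
    rw [hk]
    have h1 : (2 : Nat) ^ k < 2 ^ 128 := Nat.pow_lt_pow_right (by norm_num) (by omega)
    calc ((2 ^ k : Nat) : Int) < ((2 ^ 128 : Nat) : Int) := by exact_mod_cast h1
      _ = 2 ^ 128 := by norm_cast
  rw [pvIsPow2_iff q hbound]
  refine ⟨?_, k, ?_⟩
  · rw [hk]
    exact_mod_cast Nat.two_pow_pos k
  · rw [hk]
    push_cast
    ring

theorem pvBig_sorted : ∀ q ∈ pvBig,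
    PySem.List.sorted (PySem.Int.toChars q) (fun x => x) false ∈
      ["0112344778".toList, "1234446788".toList, "2244667999".toList, "2345588999".toList] := by
  decide

theorem pvAll_digits {l : List Char} (h : l.all PySem.Chars.isdigit = true) :
    ∀ c ∈ l, PySem.Chars.isdigit c = true := by
  simpa [List.all_eq_true] using h

-- ----- assembly helpers -----
theorem pvHead_ne (t : List Char) (hne : t ≠ [])
    (h0 : ¬ (PySem.List.pyGet? t 0 = some '0')) : t.headI ≠ '0' := by
  obtain ⟨c, t', rfl⟩ := List.exists_cons_of_ne_nil hne
  simp [pysem] at h0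
  simpa using h0

theorem pvAlt_true_of_perm (n q : Int) (hperm : (PySem.Int.toChars q).Perm (PySem.Int.toChars n))
    (hlen : (PySem.Int.toChars n).length ≤ 10)
    (hdig : ∀ ch ∈ PySem.Int.toChars q, PySem.Chars.isdigit ch = true)
    (hne : PySem.Int.toChars q ≠ [])
    (hhd : ¬ (PySem.List.pyGet? (PySem.Int.toChars q) 0 = some '0'))
    (hpow : pvIsPow2 (pvValFrom 0 (PySem.Int.toChars q)) = true) :
    reorderedPowerOf2_alt n = true := by
  have hg : PySem.Str.strIsdigit (PySem.Int.toStr n) = true := by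
    rw [pvGuard_iff]
    constructor
    · intro h
      rw [h] at hperm
      exact hne hperm.eq_nil
    · intro c hc
      exact hdig c (hperm.mem_iff.mpr hc)
  rw [pvB_char n hg hlen]
  exact ⟨PySem.Int.toChars q, hperm, hhd, hpow⟩

theorem pvD_perm (n : Int) (hD : D_reorderedPowerOf2 n) :
    ∃ q ∈ pvBig, (PySem.Int.toChars q).Perm (PySem.Int.toChars n) := by
  have hkey : ∀ q ∈ pvBig,
      PySem.List.sorted (PySem.Int.toChars n) (fun x => x) false =
        PySem.List.sorted (PySem.Int.toChars q) (fun x => x) false →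
      (PySem.Int.toChars q).Perm (PySem.Int.toChars n) := by
    intro q _ h
    exact ((PySem.List.sorted_id_eq_sorted_id_iff_perm _ _).mp h.symm)
  unfold D_reorderedPowerOf2 at hD
  simp only [List.mem_cons, List.not_mem_nil, or_false] at hD
  rcases hD with h | h | h | h
  · exact ⟨1073741824, by decide, hkey _ (by decide) (by rw [h]; decide)⟩
  · exact ⟨2147483648, by decide, hkey _ (by decide) (by rw [h]; decide)⟩
  · exact ⟨4294967296, by decide, hkey _ (by decide) (by rw [h]; decide)⟩
  · exact ⟨8589934592, by decide, hkey _ (by decide) (by rw [h]; decide)⟩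

-- inside D_, A misses (all its candidates are too short) and B finds the big power
theorem pvExact_parts (n : Int) (hD : D_reorderedPowerOf2 n) :
    reorderedPowerOf2 n = false ∧ reorderedPowerOf2_alt n = true := by
  obtain ⟨q, hqmem, hperm⟩ := pvD_perm n hD
  obtain ⟨hdig', hne, hhd, hval, hlen, k, hk34, hk⟩ := pvBig_facts q hqmem
  have hdig := pvAll_digits hdig'
  constructor
  · rw [← Bool.not_eq_true, pvA_char]
    rintro ⟨c, hc, hcp⟩
    have h1 := (pvCands_facts c hc).2.2.2.2.1
    have h2 := hcp.length_eq
    have h3 := hperm.length_eq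
    omega
  · have hlen10 : (PySem.Int.toChars n).length ≤ 10 := by
      rw [← hperm.length_eq]
      omega
    exact pvAlt_true_of_perm n q hperm hlen10 hdig hne hhd (pvIsPow2_of q k hk hk34 hval)

-- within the domain, a digit-only str(n) has at most 10 characters
theorem pvLen10 (n : Int) (hdom : Dom_reorderedPowerOf2 n)
    (hg : PySem.Str.strIsdigit (PySem.Int.toStr n) = true) :
    (PySem.Int.toChars n).length ≤ 10 := by
  obtain ⟨hne, hdig⟩ := (pvGuard_iff n).mp hg
  have hn0 : 0 ≤ n := by
    by_contra hneg
    have hminus : PySem.Int.toChars n = '-' :: Nat.toDigits 10 n.natAbs := by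
      rw [PySem.Int.toChars, if_pos (by omega)]
    have := hdig '-' (by rw [hminus]; exact List.mem_cons_self ..)
    simp [pvIsdigit_iff] at this
  have hval : n.toNat < 10 ^ 10 := by
    unfold Dom_reorderedPowerOf2 pvDomInt at hdom
    simp only [decide_eq_true_eq] at hdom
    omega
  have := Nat.toDigits_length 10 n.toNat 10 (by norm_num) hval
  rw [PySem.Int.toChars, if_neg (by omega)]
  exact this

-- outside D_, a successful permutation forces a candidate of A
theorem pvAlt_to_A (n : Int) (hdom : Dom_reorderedPowerOf2 n)
    (hnd : ¬ D_reorderedPowerOf2 n)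
    (hg : PySem.Str.strIsdigit (PySem.Int.toStr n) = true)
    (halt : reorderedPowerOf2_alt n = true) : reorderedPowerOf2 n = true := by
  obtain ⟨hne, hdig⟩ := (pvGuard_iff n).mp hg
  have hlen10 := pvLen10 n hdom hg
  obtain ⟨t, hperm, h0, hpow⟩ := (pvB_char n hg hlen10).mp halt
  have hdt : ∀ c ∈ t, PySem.Chars.isdigit c = true := fun c hc => hdig c (hperm.mem_iff.mp hc)
  have hlent : t.length ≤ 10 := by
    rw [hperm.length_eq]; exact hlen10
  -- the value of t is a power of two below 10^10
  have hvlt : pvValN t < 10 ^ 10 := by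
    have h1 := pvValN_lt t hdt
    calc pvValN t < 10 ^ t.length := h1
      _ ≤ 10 ^ 10 := Nat.pow_le_pow_right (by norm_num) hlent
  have hcast : pvValFrom 0 t = (pvValN t : Int) := pvValFrom_zero t hdt
  have hp2 : 0 < pvValFrom 0 t ∧ ∃ k : Nat, pvValFrom 0 t = 2 ^ k := by
    rw [← pvIsPow2_iff]
    · exact hpow
    · rw [hcast]
      have h := hvlt
      omega
  obtain ⟨hppos, k, hk⟩ := hp2
  have hkN : pvValN t = 2 ^ k := by
    rw [hcast] at hk
    exact_mod_cast hk
  have htne : t ≠ [] := by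
    intro h
    rw [h] at hkN
    have h2k := Nat.two_pow_pos k
    simp [pvValN] at hkN
    omega
  have hht : t.headI ≠ '0' := pvHead_ne t htne h0
  have hk33 : k < 34 := by
    by_contra hk34
    have : (2:Nat) ^ 34 ≤ 2 ^ k := Nat.pow_le_pow_right (by norm_num) (by omega)
    have h10 : (10:Nat) ^ 10 < 2 ^ 34 := by norm_num
    omega
  by_cases hk29 : k < 30
  · -- a candidate of A
    obtain ⟨hmem, hval⟩ := pvCands_val k hk29
    obtain ⟨hdigc', hnec, hhdc, _, _, _⟩ := pvCands_facts _ hmem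
    have hdigc := pvAll_digits hdigc'
    have ht : t = PySem.Int.toChars ((2 ^ k : Nat) : Int) :=
      pvValN_inj _ _ hdt hdigc htne hnec hht (pvHead_ne _ hnec hhdc) (by rw [hkN, hval])
    rw [pvA_char]
    refine ⟨((2 ^ k : Nat) : Int), hmem, ?_⟩
    rw [← ht]
    exact hperm
  · -- would be a 10-digit power of two: that is exactly D_
    exfalso
    obtain ⟨hmem, hval⟩ := pvBig_val k (by omega) hk33
    obtain ⟨hdigq', hneq, hhdq, _, _, _⟩ := pvBig_facts _ hmem
    have hdigq := pvAll_digits hdigq'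
    have ht : t = PySem.Int.toChars ((2 ^ k : Nat) : Int) :=
      pvValN_inj _ _ hdt hdigq htne hneq hht (pvHead_ne _ hneq hhdq) (by rw [hkN, hval])
    apply hnd
    have hsort : PySem.List.sorted (PySem.Int.toChars n) (fun x => x) false =
        PySem.List.sorted (PySem.Int.toChars ((2 ^ k : Nat) : Int)) (fun x => x) false := by
      apply PySem.List.sorted_eq_sorted_of_perm _ _ _ (fun a b h => h)
      rw [← ht]
      exact hperm.symm
    unfold D_reorderedPowerOf2
    rw [hsort]
    exact pvBig_sorted _ hmem

-- ===== VERDICT (by name: the statement is the Claim_ definition above) =====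
theorem reorderedPowerOf2_spec : Claim_unchanged_reorderedPowerOf2 := by
  intro n hdom
  unfold Spec_reorderedPowerOf2
  intro hnd
  by_cases hg : PySem.Str.strIsdigit (PySem.Int.toStr n) = true
  · rw [Bool.eq_iff_iff]
    constructor
    · intro hA
      obtain ⟨c, hc, hcp⟩ := (pvA_char n).mp hA
      obtain ⟨hdigc', hnec, hhdc, hvalc, _, k, hk30, hk⟩ := pvCands_facts c hc
      exact pvAlt_true_of_perm n c hcp (pvLen10 n hdom hg) (pvAll_digits hdigc') hnec hhdc
        (pvIsPow2_of c k hk (by omega) hvalc)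
    · exact pvAlt_to_A n hdom hnd hg
  · rw [Bool.not_eq_true] at hg
    rw [pvAlt_guard_false n hg, ← Bool.not_eq_true, pvA_char]
    rintro ⟨c, hc, hcp⟩
    obtain ⟨hdigc', hnec, _, _, _, _⟩ := pvCands_facts c hc
    have hdigc := pvAll_digits hdigc'
    rw [← Bool.not_eq_true] at hg
    apply hg
    rw [pvGuard_iff]
    constructor
    · intro h
      rw [h] at hcp
      exact hnec hcp.eq_nil
    · intro c' hc'
      exact hdigc c' (hcp.mem_iff.mpr hc')

theorem reorderedPowerOf2_changed : Claim_changed_reorderedPowerOf2 := by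
  unfold Claim_changed_reorderedPowerOf2
  have hD : D_reorderedPowerOf2 pvDiffWitness_reorderedPowerOf2 := by decide
  obtain ⟨hA, hB⟩ := pvExact_parts _ hD
  exact ⟨by decide, hD, hA, hB, by decide⟩

theorem reorderedPowerOf2_tight : Claim_exact_reorderedPowerOf2 := by
  intro n _ hD
  obtain ⟨hA, hB⟩ := pvExact_parts n hD
  rw [hA, hB]
  decide
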